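-- pv_equiv track=rewrite | github.com/DavidoffichW/mdrepoatlas | src/c2md/cli.py | group_by_language
-- ===== SOURCE A (Python) =====
-- def group_by_language(file_records):
--     groups = {}
--     for r in file_records:
--         lang = r["lang"] if r["lang"] else "unknown"
--         groups.setdefault(lang, []).append(r)
--     for k in groups:
--         groups[k].sort(key=lambda x: x["path"])
--     return dict(sorted(groups.items(), key=lambda kv: kv[0]))
-- ===== SOURCE B (Python) =====
-- def group_by_language(file_records):
--     # Sort once by (language, path); then chunk consecutive runs of equal
--     # language into the result dict -- no per-group sort, no final key sort.
--     def lang_of(r):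
--         return r["lang"] or "unknown"
--     recs = sorted(file_records, key=lambda r: (lang_of(r), r["path"]))
--     out = {}
--     i = 0
--     n = len(recs)
--     while i < n:
--         lang = lang_of(recs[i])
--         j = i + 1
--         while j < n and lang_of(recs[j]) == lang:
--             j += 1
--         out[lang] = recs[i:j]
--         i = j
--     return out
-- ===== Notes on version B (the rewrite author's own statement) =====
-- stated objective: alternative
-- what changed: B sorts the whole list once by the (language, path) tuple and then chunks consecutive runs of equal language in a single index scan, instead of A's dict-accumulation followed by a per-group sort and a final sort of the keys.
import Mathlib
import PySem

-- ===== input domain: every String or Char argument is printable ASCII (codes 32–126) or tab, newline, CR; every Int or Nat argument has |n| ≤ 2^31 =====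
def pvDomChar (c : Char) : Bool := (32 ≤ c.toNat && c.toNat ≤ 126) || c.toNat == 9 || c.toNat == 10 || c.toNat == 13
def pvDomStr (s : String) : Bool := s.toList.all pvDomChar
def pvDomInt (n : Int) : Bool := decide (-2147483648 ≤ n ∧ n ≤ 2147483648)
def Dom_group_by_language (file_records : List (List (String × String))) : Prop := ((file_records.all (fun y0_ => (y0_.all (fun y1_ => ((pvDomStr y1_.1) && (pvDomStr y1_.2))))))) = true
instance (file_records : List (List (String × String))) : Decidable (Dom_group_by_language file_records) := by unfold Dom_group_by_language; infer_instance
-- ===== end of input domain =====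

-- B sorts the whole list once by the (language, path) tuple and then chunks consecutive
-- runs of equal language in one scan, instead of A's dict-accumulation followed by a
-- per-group sort and a final sort of the keys; same return value on Pre_.

-- `r["lang"] if r["lang"] else "unknown"`  ("" is the only falsy str); exact under Pre_
def pyLangOf (r : List (String × String)) : String :=
  let v := (PySem.Dict.mk r).getD "lang" ""
  if v = "" then "unknown" else v

-- `r["path"]`; exact under Pre_ (the key is present)
def pyPathOf (r : List (String × String)) : String :=
  (PySem.Dict.mk r).getD "path" ""

-- ===== PORT A =====
def group_by_language (file_records : List (List (String × String))) : List (String × List (List (String × String))) :=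
  -- groups.setdefault(lang, []).append(r)  ==  groups[lang] = groups.get(lang, []) + [r]
  let groups : PySem.Dict String (List (List (String × String))) :=
    file_records.foldl (fun d r => d.modify (pyLangOf r) [] (fun g => g ++ [r])) PySem.Dict.empty
  -- for k in groups: groups[k].sort(key=lambda x: x["path"])
  let items := groups.items.map (fun kv => (kv.1, PySem.List.sorted kv.2 pyPathOf))
  -- dict(sorted(groups.items(), key=lambda kv: kv[0]))
  (PySem.Dict.ofList (PySem.List.sorted items (fun kv => kv.1))).items

-- ===== PORT B =====
-- the index scan `while i < n: … while j < n and lang_of(recs[j]) == lang: j += 1; out[lang] = recs[i:j]; i = j`: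
-- each outer step takes the maximal run of records with the current record's language
-- (recs[i:j] = recs[i] plus the takeWhile of the remainder) and continues after it.
-- On the (lang, path)-sorted list each language occurs in one run, so the dict
-- assignments `out[lang] = …` are fresh keys in scan order = this list of pairs.
def chunkRuns (l : List (List (String × String))) : List (String × List (List (String × String))) :=
  match l with
  | [] => []
  | r :: rest =>
    (pyLangOf r, r :: rest.takeWhile (fun x => pyLangOf x == pyLangOf r)) ::
      chunkRuns (rest.dropWhile (fun x => pyLangOf x == pyLangOf r))
termination_by l.length
decreasing_by
  have := (rest.dropWhile_sublist (fun x => pyLangOf x == pyLangOf r)).length_le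
  simp; omega

def group_by_language_alt (file_records : List (List (String × String))) : List (String × List (List (String × String))) :=
  -- recs = sorted(file_records, key=lambda r: (lang_of(r), r["path"]))
  chunkRuns (PySem.List.sorted2 file_records pyLangOf pyPathOf)

-- ===== PRECONDITION & SPEC =====
-- A raises KeyError on r["lang"] / r["path"] when a record lacks either key; Pre_ excludes exactly those inputs.
def Pre_group_by_language (file_records : List (List (String × String))) : Prop :=
  ∀ r ∈ file_records, (PySem.Dict.mk r).contains "lang" = true ∧ (PySem.Dict.mk r).contains "path" = true
instance (file_records : List (List (String × String))) : Decidable (Pre_group_by_language file_records) := by unfold Pre_group_by_language; infer_instance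

def pvWitness_group_by_language : (List (List (String × String))) :=
  [[("lang", ""), ("path", "b.txt")], [("lang", "py"), ("path", "a.py")]]

def Spec_group_by_language (file_records : List (List (String × String))) (out : List (String × List (List (String × String)))) : Prop := out = group_by_language_alt file_records
instance (file_records : List (List (String × String))) (out : List (String × List (List (String × String)))) : Decidable (Spec_group_by_language file_records out) := by unfold Spec_group_by_language; infer_instance

-- ===== CLAIM (what is proved, stated in full; the proofs are below) =====
def Claim_equal_group_by_language : Prop := ∀ (file_records : List (List (String × String))), Dom_group_by_language file_records → Pre_group_by_language file_records → Spec_group_by_language file_records (group_by_language file_records)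

-- ===== LEMMAS AND PROOFS =====

-- Python's tuple comparison (k1 a, k2 a) < (k1 b, k2 b), exactly as sorted2 stores it
def tupLt {α : Type} (k1 k2 : α → String) (a b : α) : Bool :=
  decide (k1 a < k1 b) || (!decide (k1 b < k1 a) && decide (k2 a < k2 b))

lemma tupLt_iff {α : Type} (k1 k2 : α → String) (a b : α) :
    tupLt k1 k2 a b = true ↔ (k1 a < k1 b ∨ (¬ k1 b < k1 a ∧ k2 a < k2 b)) := by
  simp [tupLt]

lemma sorted2_eq_foldl {α : Type} (xs : List α) (k1 k2 : α → String) :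
    PySem.List.sorted2 xs k1 k2 = xs.foldl (fun acc x => PySem.List.insertBy (tupLt k1 k2) x acc) [] := rfl

lemma sorted_eq_foldl' {α : Type} (xs : List α) (key : α → String) :
    PySem.List.sorted xs key = xs.foldl (fun acc x => PySem.List.insertBy (fun a b => decide (key a < key b)) x acc) [] := rfl

lemma insertBy_nil {α : Type} (before : α → α → Bool) (x : α) :
    PySem.List.insertBy before x [] = [x] := rfl

lemma insertBy_cons {α : Type} (before : α → α → Bool) (x y : α) (ys : List α) :
    PySem.List.insertBy before x (y :: ys)
      = if before x y then x :: y :: ys else y :: PySem.List.insertBy before x ys := rfl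

lemma tupLt_asymm {α : Type} {k1 k2 : α → String} {a b : α}
    (h : tupLt k1 k2 a b = true) : tupLt k1 k2 b a = false := by
  rw [tupLt_iff] at h
  rw [Bool.eq_false_iff, Ne, tupLt_iff]
  rcases h with h | ⟨h1, h2⟩
  · rintro (h' | ⟨h1', _⟩)
    · exact absurd h (lt_asymm h')
    · exact h1' h
  · rintro (h' | ⟨_, h2'⟩)
    · exact h1 h'
    · exact absurd h2 (lt_asymm h2')

lemma tupLt_trans {α : Type} {k1 k2 : α → String} {a b c : α}
    (hab : tupLt k1 k2 a b = true) (hbc : tupLt k1 k2 b c = true) : tupLt k1 k2 a c = true := by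
  rw [tupLt_iff] at hab hbc ⊢
  rcases hab with h | ⟨h1, h2⟩ <;> rcases hbc with h' | ⟨h1', h2'⟩
  · exact Or.inl (lt_trans h h')
  · exact Or.inl (lt_of_lt_of_le h (not_lt.mp h1'))
  · exact Or.inl (lt_of_le_of_lt (not_lt.mp h1) h')
  · exact Or.inr ⟨fun hc => h1 (lt_of_le_of_lt (not_lt.mp h1') hc), lt_trans h2 h2'⟩

lemma tupLt_false_le {α : Type} {k1 k2 : α → String} {a b : α}
    (h : tupLt k1 k2 b a = false) : k1 a ≤ k1 b := by
  rw [Bool.eq_false_iff, Ne, tupLt_iff] at h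
  push_neg at h
  exact h.1

-- x strictly below y in tuple order, z not strictly below y  ⇒  x strictly below z
lemma tupLt_of_lt_of_not_lt {α : Type} {k1 k2 : α → String} {x y z : α}
    (hxy : tupLt k1 k2 x y = true) (hzy : tupLt k1 k2 z y = false) : tupLt k1 k2 x z = true := by
  rw [tupLt_iff] at hxy ⊢
  rw [Bool.eq_false_iff, Ne, tupLt_iff] at hzy
  push_neg at hzy
  obtain ⟨hyz, hz2⟩ := hzy
  rcases hxy with h | ⟨h1, h2⟩
  · exact Or.inl (lt_of_lt_of_le h hyz)
  · have hxz : k1 x ≤ k1 z := le_trans (not_lt.mp h1) hyz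
    rcases lt_or_eq_of_le hxz with hlt | heq
    · exact Or.inl hlt
    · have hy_eq : k1 y = k1 z := le_antisymm hyz (heq ▸ not_lt.mp h1)
      have h3 : k2 y ≤ k2 z := hz2 (le_of_eq hy_eq.symm)
      refine Or.inr ⟨?_, lt_of_lt_of_le h2 h3⟩
      rw [← heq]
      exact lt_irrefl _

-- insertion keeps the sortedness invariant of insertion sort
lemma insertBy_pairwise {α : Type} {k1 k2 : α → String} (x : α) (l : List α)
    (h : l.Pairwise (fun a b => tupLt k1 k2 b a = false)) :
    (PySem.List.insertBy (tupLt k1 k2) x l).Pairwise (fun a b => tupLt k1 k2 b a = false) := by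
  induction l with
  | nil => simp [insertBy_nil]
  | cons y ys ih =>
    rw [List.pairwise_cons] at h
    obtain ⟨hy, hys⟩ := h
    rw [insertBy_cons]
    by_cases hxy : tupLt k1 k2 x y = true
    · rw [if_pos hxy]
      refine List.Pairwise.cons ?_ (List.Pairwise.cons hy hys)
      intro z hz
      rcases List.mem_cons.mp hz with rfl | hz
      · exact tupLt_asymm hxy
      · by_contra hc
        have hzx : tupLt k1 k2 z x = true := by
          cases hcx : tupLt k1 k2 z x
          · exact absurd hcx hc
          · rfl
        exact absurd (tupLt_trans hzx hxy) (by simp [hy z hz])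
    · rw [if_neg hxy]
      refine List.Pairwise.cons ?_ (ih hys)
      intro z hz
      rcases (PySem.List.mem_insertBy _ x z ys).mp hz with rfl | hz
      · exact Bool.eq_false_iff.mpr hxy
      · exact hy z hz

lemma foldl_insertBy_pairwise {α : Type} {k1 k2 : α → String} (xs : List α) (acc : List α)
    (h : acc.Pairwise (fun a b => tupLt k1 k2 b a = false)) :
    (xs.foldl (fun m y => PySem.List.insertBy (tupLt k1 k2) y m) acc).Pairwise
      (fun a b => tupLt k1 k2 b a = false) := by
  induction xs generalizing acc with
  | nil => exact h
  | cons y ys ih => exact ih _ (insertBy_pairwise y acc h)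

lemma sorted2_pairwise' {α : Type} (xs : List α) (k1 k2 : α → String) :
    (PySem.List.sorted2 xs k1 k2).Pairwise (fun a b => tupLt k1 k2 b a = false) := by
  rw [sorted2_eq_foldl]
  exact foldl_insertBy_pairwise xs [] (by simp)

-- filtering one tuple-insertion, inserted element kept by the filter
lemma filter_insertBy_pos {α : Type} {k1 k2 : α → String} {c : String} {x : α} (hc : k1 x = c)
    (l : List α) (h : l.Pairwise (fun a b => tupLt k1 k2 b a = false)) :
    (PySem.List.insertBy (tupLt k1 k2) x l).filter (fun r => k1 r == c)
      = PySem.List.insertBy (fun a b => decide (k2 a < k2 b)) x (l.filter (fun r => k1 r == c)) := by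
  have hx' : (k1 x == c) = true := by simp [hc]
  induction l with
  | nil => simp [insertBy_nil, hx']
  | cons y ys ih =>
    rw [List.pairwise_cons] at h
    obtain ⟨hy, hys⟩ := h
    rw [insertBy_cons]
    by_cases hxy : tupLt k1 k2 x y = true
    · rw [if_pos hxy]
      by_cases hyc : k1 y = c
      · have hy' : (k1 y == c) = true := by simp [hyc]
        have hk2 : k2 x < k2 y := by
          rcases (tupLt_iff k1 k2 x y).mp hxy with hl | ⟨_, hl⟩
          · exact absurd hl (by rw [hc, hyc]; exact lt_irrefl _)
          · exact hl
        rw [List.filter_cons_of_pos (p := fun r => k1 r == c) hx', List.filter_cons_of_pos (p := fun r => k1 r == c) hy',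
          insertBy_cons, if_pos (decide_eq_true hk2)]
      · have hy' : (k1 y == c) = false := by simp [hyc]
        rw [List.filter_cons_of_pos (p := fun r => k1 r == c) hx', List.filter_cons_of_neg (p := fun r => k1 r == c) (by simp [hy'])]
        cases hfy : ys.filter (fun r => k1 r == c) with
        | nil => rw [insertBy_nil]
        | cons z m =>
          have hz : z ∈ ys ∧ k1 z = c := by
            have hzz : z ∈ ys.filter (fun r => k1 r == c) := by
              rw [hfy]; exact List.mem_cons_self
            exact ⟨List.mem_of_mem_filter hzz, by simpa using List.of_mem_filter hzz⟩
          have hxz : tupLt k1 k2 x z = true := tupLt_of_lt_of_not_lt hxy (hy z hz.1)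
          have hk2 : k2 x < k2 z := by
            rcases (tupLt_iff k1 k2 x z).mp hxz with hl | ⟨_, hl⟩
            · exact absurd hl (by rw [hc, hz.2]; exact lt_irrefl _)
            · exact hl
          rw [insertBy_cons, if_pos (decide_eq_true hk2)]
    · rw [if_neg hxy]
      by_cases hyc : k1 y = c
      · have hy' : (k1 y == c) = true := by simp [hyc]
        have hk2 : ¬ k2 x < k2 y := by
          intro hl
          exact hxy ((tupLt_iff k1 k2 x y).mpr (Or.inr ⟨by rw [hc, hyc]; exact lt_irrefl _, hl⟩))
        rw [List.filter_cons_of_pos (p := fun r => k1 r == c) hy', List.filter_cons_of_pos (p := fun r => k1 r == c) hy', ih hys,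
          insertBy_cons, if_neg (by simpa using hk2)]
      · have hy' : (k1 y == c) = false := by simp [hyc]
        rw [List.filter_cons_of_neg (p := fun r => k1 r == c) (by simp [hy']), List.filter_cons_of_neg (p := fun r => k1 r == c) (by simp [hy']), ih hys]

-- filtering one tuple-insertion, inserted element dropped by the filter
lemma filter_insertBy_neg {α : Type} {k1 k2 : α → String} {c : String} {x : α} (hc : ¬ k1 x = c)
    (l : List α) :
    (PySem.List.insertBy (tupLt k1 k2) x l).filter (fun r => k1 r == c) = l.filter (fun r => k1 r == c) := by
  have hx' : (k1 x == c) = false := by simp [hc]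
  induction l with
  | nil => simp [insertBy_nil, hx']
  | cons y ys ih =>
    rw [insertBy_cons]
    by_cases hxy : tupLt k1 k2 x y = true
    · rw [if_pos hxy, List.filter_cons_of_neg (p := fun r => k1 r == c) (by simp [hx'])]
    · rw [if_neg hxy]
      by_cases hyc : k1 y = c
      · have hy' : (k1 y == c) = true := by simp [hyc]
        rw [List.filter_cons_of_pos (p := fun r => k1 r == c) hy', List.filter_cons_of_pos (p := fun r => k1 r == c) hy', ih]
      · have hy' : (k1 y == c) = false := by simp [hyc]
        rw [List.filter_cons_of_neg (p := fun r => k1 r == c) (by simp [hy']), List.filter_cons_of_neg (p := fun r => k1 r == c) (by simp [hy']), ih]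

lemma filter_foldl_insertBy {α : Type} {k1 k2 : α → String} {c : String} (xs : List α) (acc : List α)
    (h : acc.Pairwise (fun a b => tupLt k1 k2 b a = false)) :
    (xs.foldl (fun m y => PySem.List.insertBy (tupLt k1 k2) y m) acc).filter (fun r => k1 r == c)
      = (xs.filter (fun r => k1 r == c)).foldl
          (fun m y => PySem.List.insertBy (fun a b => decide (k2 a < k2 b)) y m)
          (acc.filter (fun r => k1 r == c)) := by
  induction xs generalizing acc with
  | nil => rfl
  | cons x xs ih =>
    simp only [List.foldl_cons]
    by_cases hc : k1 x = c
    · rw [List.filter_cons_of_pos (p := fun r => k1 r == c) (by simp [hc]), List.foldl_cons,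
        ih _ (insertBy_pairwise x acc h), filter_insertBy_pos hc acc h]
    · rw [List.filter_cons_of_neg (p := fun r => k1 r == c) (by simp [hc]),
        ih _ (insertBy_pairwise x acc h), filter_insertBy_neg hc acc]

-- STABILITY: each tuple-sort group equals the group of the original list, sorted by the second key
lemma filter_sorted2 {α : Type} (xs : List α) (k1 k2 : α → String) (c : String) :
    (PySem.List.sorted2 xs k1 k2).filter (fun r => k1 r == c)
      = PySem.List.sorted (xs.filter (fun r => k1 r == c)) k2 := by
  rw [sorted2_eq_foldl, sorted_eq_foldl']
  simpa using filter_foldl_insertBy (k2 := k2) (c := c) xs [] (by simp)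

lemma foldl_add_sublist {α : Type} [BEq α] (xs : List α) (s : List α) :
    ∃ t, List.foldl PySem.Set.add s xs = s ++ t ∧ t.Sublist xs := by
  induction xs generalizing s with
  | nil => exact ⟨[], by simp⟩
  | cons x xs ih =>
    simp only [List.foldl_cons, PySem.Set.add]
    by_cases hx : PySem.Set.contains s x = true
    · rw [if_pos hx]
      obtain ⟨t, ht, hs⟩ := ih s
      exact ⟨t, ht, hs.cons x⟩
    · rw [if_neg hx]
      obtain ⟨t, ht, hs⟩ := ih (s ++ [x])
      exact ⟨x :: t, by simpa using ht, hs.cons₂ x⟩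

lemma ofList_sublist {α : Type} [BEq α] (xs : List α) :
    (PySem.Set.ofList xs : List α).Sublist xs := by
  obtain ⟨t, ht, hs⟩ := foldl_add_sublist xs []
  simpa [PySem.Set.ofList, ht] using hs

-- ordered dedup of a nondecreasing list is strictly increasing
lemma ofList_pairwise_lt (xs : List String) (h : xs.Pairwise (· ≤ ·)) :
    (PySem.Set.ofList xs : List String).Pairwise (· < ·) := by
  have h1 : (PySem.Set.ofList xs : List String).Pairwise (· ≤ ·) := List.Pairwise.sublist (ofList_sublist xs) h
  have h2 : (PySem.Set.ofList xs : List String).Nodup := PySem.Set.nodup_ofList xs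
  exact (h1.and h2).imp (fun hab => lt_of_le_of_ne hab.1 hab.2)

-- items of the grouping foldl, as a map over the distinct languages in first-seen order
lemma grp_items (l : List (List (String × String))) :
    (l.foldl (fun d r => d.modify (pyLangOf r) [] (fun g => g ++ [r])) PySem.Dict.empty).items
      = (PySem.Set.ofList (l.map pyLangOf) : List String).map
          (fun k => (k, l.filter (fun r => pyLangOf r == k))) := by
  have hnd : (l.foldl (fun d r => d.modify (pyLangOf r) [] (fun g => g ++ [r])) PySem.Dict.empty).keys.Nodup :=
    PySem.Dict.nodup_keys_foldl_modify_key l pyLangOf [] (fun _ r g => g ++ [r]) PySem.Dict.empty (by simp [PySem.Dict.empty])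
  have hkeys : (l.foldl (fun d r => d.modify (pyLangOf r) [] (fun g => g ++ [r])) PySem.Dict.empty).keys
      = (PySem.Set.ofList (l.map pyLangOf) : List String) :=
    PySem.Dict.keys_foldl_modify_key l pyLangOf [] (fun _ r g => g ++ [r]) PySem.Dict.empty
  have hgetD : ∀ c, (l.foldl (fun d r => d.modify (pyLangOf r) [] (fun g => g ++ [r])) PySem.Dict.empty).getD c []
      = l.filter (fun r => pyLangOf r == c) := by
    intro c
    have hm := PySem.Dict.getD_foldl_modify_append (l.map (fun r => (pyLangOf r, r)))
      (PySem.Dict.empty : PySem.Dict String (List (List (String × String)))) c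
    rw [List.foldl_map] at hm
    simpa [List.filter_map, List.map_map, Function.comp_def] using hm
  rw [PySem.Dict.items_eq_map_keys _ hnd [], hkeys]
  simp only [hgetD]

-- a dict built from distinct keys lists exactly those pairs
lemma items_ofList_of_nodup {κ ν : Type} [BEq κ] [LawfulBEq κ] (ps : List (κ × ν))
    (h : (ps.map Prod.fst).Nodup) : (PySem.Dict.ofList ps).items = ps := by
  have hfresh : ∀ a ∈ ps, (PySem.Dict.empty : PySem.Dict κ ν).contains a.1 = false := by
    intro a _; simp [PySem.Dict.empty]
  have := PySem.Dict.items_foldl_insert_fresh ps Prod.fst Prod.snd PySem.Dict.empty hfresh h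
  simpa [PySem.Dict.empty] using this

-- the dedup of a run of k's followed by non-k's: k, then the dedup of the rest
lemma foldl_add_all_mem {α : Type} [BEq α] [LawfulBEq α] (xs s : List α)
    (h : ∀ x ∈ xs, x ∈ s) : List.foldl PySem.Set.add s xs = s := by
  induction xs with
  | nil => rfl
  | cons x xs ih =>
    simp only [List.foldl_cons]
    rw [PySem.Set.add_of_mem (h x List.mem_cons_self)]
    exact ih (fun y hy => h y (List.mem_cons_of_mem _ hy))

lemma foldl_add_cons_of_not_mem {α : Type} [BEq α] [LawfulBEq α] (xs s : List α) (k : α)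
    (h : ∀ x ∈ xs, x ≠ k) : List.foldl PySem.Set.add (k :: s) xs = k :: List.foldl PySem.Set.add s xs := by
  induction xs generalizing s with
  | nil => rfl
  | cons x xs ih =>
    have hx : x ≠ k := h x List.mem_cons_self
    have hcont : PySem.Set.contains (k :: s) x = PySem.Set.contains s x := by
      simp [PySem.Set.contains, hx]
    simp only [List.foldl_cons, PySem.Set.add, hcont]
    by_cases hm : PySem.Set.contains s x = true
    · rw [if_pos hm, if_pos hm]
      exact ih s (fun y hy => h y (List.mem_cons_of_mem _ hy))
    · rw [if_neg hm, if_neg hm]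
      have := ih (s ++ [x]) (fun y hy => h y (List.mem_cons_of_mem _ hy))
      simpa using this

-- chunkRuns of a list nondecreasing in language = map of filters over the distinct languages
lemma chunkRuns_eq (l : List (List (String × String)))
    (h : l.Pairwise (fun a b => pyLangOf a ≤ pyLangOf b)) :
    chunkRuns l = (PySem.Set.ofList (l.map pyLangOf) : List String).map
        (fun k => (k, l.filter (fun r => pyLangOf r == k))) := by
  induction l using chunkRuns.induct with
  | case1 => simp [chunkRuns]
  | case2 r rest ih =>
    set k := pyLangOf r with hk
    set p : List (String × String) → Bool := fun x => pyLangOf x == k with hp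
    set run := rest.takeWhile p with hrundef
    set tail := rest.dropWhile p with htaildef
    rw [List.pairwise_cons] at h
    obtain ⟨hr, hrest⟩ := h
    have hsplit : rest = run ++ tail := (List.takeWhile_append_dropWhile).symm
    have hrun : ∀ x ∈ run, pyLangOf x = k := by
      intro x hx
      have := List.mem_takeWhile_imp hx
      simpa [hp] using this
    have htail : ∀ x ∈ tail, pyLangOf x ≠ k := by
      intro x hx
      cases htl : tail with
      | nil => rw [htl] at hx; cases hx
      | cons d ds =>
        have hd : p d = false := by
          have : (rest.dropWhile p).head? = some d := by rw [← htaildef, htl]; rfl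
          have := List.head?_dropWhile_not (p := p) (l := rest)
          rw [← htaildef, htl] at this
          simpa using this
        have hdk : pyLangOf d ≠ k := by simpa [hp] using hd
        have hdmem : d ∈ rest := by
          rw [hsplit, htl]; exact List.mem_append_right _ List.mem_cons_self
        have hkd : k ≤ pyLangOf d := hr d hdmem
        have hklt : k < pyLangOf d := lt_of_le_of_ne hkd (Ne.symm hdk)
        rw [htl] at hx
        rcases List.mem_cons.mp hx with rfl | hx
        · exact hdk
        · have htailpw : tail.Pairwise (fun a b => pyLangOf a ≤ pyLangOf b) :=
            hrest.sublist (List.dropWhile_sublist p)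
          have : pyLangOf d ≤ pyLangOf x := by
            rw [htl] at htailpw
            exact (List.pairwise_cons.mp htailpw).1 x hx
          exact fun hc => absurd (lt_of_lt_of_le hklt this) (by rw [hc]; exact lt_irrefl k)
    have htailpw : tail.Pairwise (fun a b => pyLangOf a ≤ pyLangOf b) :=
      hrest.sublist (List.dropWhile_sublist p)
    -- the distinct languages: k, then the tail's distinct languages
    have hofList : (PySem.Set.ofList ((r :: rest).map pyLangOf) : List String)
        = k :: (PySem.Set.ofList (tail.map pyLangOf) : List String) := by
      have h1 : (PySem.Set.ofList ((r :: rest).map pyLangOf) : List String)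
          = List.foldl PySem.Set.add [k] (run.map pyLangOf ++ tail.map pyLangOf) := by
        rw [hsplit]
        simp [PySem.Set.ofList, PySem.Set.add, PySem.Set.contains, ← hk]
      rw [h1, List.foldl_append,
        foldl_add_all_mem (run.map pyLangOf) [k] (by
          intro x hx
          obtain ⟨y, hy, rfl⟩ := List.mem_map.mp hx
          simp [hrun y hy]),
        show ([k] : List String) = k :: [] from rfl,
        foldl_add_cons_of_not_mem (tail.map pyLangOf) [] k (by
          intro x hx
          obtain ⟨y, hy, rfl⟩ := List.mem_map.mp hx
          exact htail y hy)]
      rfl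
    -- the filters
    have hfilter_k : (r :: rest).filter (fun x => pyLangOf x == k) = r :: run := by
      rw [List.filter_cons_of_pos (by simp [hk]), hsplit, List.filter_append,
        List.filter_eq_self.mpr (by intro x hx; simp [hrun x hx]),
        List.filter_eq_nil_iff.mpr (by intro x hx; simp [htail x hx]), List.append_nil]
    rw [chunkRuns, hofList, List.map_cons, ← hp, ← hrundef, ← htaildef, hfilter_k, ← hk]
    congr 1
    rw [ih htailpw]
    refine List.map_congr_left ?_
    intro c hc
    have hck : c ≠ k := by
      have : c ∈ tail.map pyLangOf := by
        have := (PySem.Set.mem_ofList (xs := tail.map pyLangOf) (y := c)).mp hc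
        exact this
      obtain ⟨y, hy, rfl⟩ := List.mem_map.mp this
      exact htail y hy
    have hfilter_c : (r :: rest).filter (fun x => pyLangOf x == c) = tail.filter (fun x => pyLangOf x == c) := by
      rw [List.filter_cons_of_neg (by simp [← hk, hck.symm]), hsplit, List.filter_append,
        List.filter_eq_nil_iff.mpr (by
          intro x hx
          simp [hrun x hx, hck.symm]), List.nil_append]
    rw [hfilter_c]

theorem group_by_language_eq (fr : List (List (String × String))) :
    group_by_language fr = group_by_language_alt fr := by
  have hA := grp_items fr
  set recs := PySem.List.sorted2 fr pyLangOf pyPathOf with hrecs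
  have hrecpw : recs.Pairwise (fun a b => pyLangOf a ≤ pyLangOf b) :=
    (sorted2_pairwise' fr pyLangOf pyPathOf).imp (fun hab => tupLt_false_le hab)
  have hB : group_by_language_alt fr
      = (PySem.Set.ofList (recs.map pyLangOf) : List String).map
          (fun k => (k, recs.filter (fun r => pyLangOf r == k))) := by
    rw [group_by_language_alt, ← hrecs, chunkRuns_eq recs hrecpw]
  simp only [group_by_language, hA, List.map_map, hB]
  -- the key lists: same languages, B's already strictly sorted
  have hmemkeys : ∀ a, a ∈ (PySem.Set.ofList (recs.map pyLangOf) : List String)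
      ↔ a ∈ (PySem.Set.ofList (fr.map pyLangOf) : List String) := by
    intro a
    rw [PySem.Set.mem_ofList, PySem.Set.mem_ofList]
    constructor <;> intro h <;> rw [List.mem_map] at h ⊢ <;>
      obtain ⟨r, hr, hra⟩ := h
    · exact ⟨r, (PySem.List.sorted2_perm fr pyLangOf pyPathOf false).mem_iff.mp hr, hra⟩
    · exact ⟨r, (PySem.List.sorted2_perm fr pyLangOf pyPathOf false).mem_iff.mpr hr, hra⟩
  have hperm : (PySem.Set.ofList (recs.map pyLangOf) : List String).Perm
      (PySem.Set.ofList (fr.map pyLangOf) : List String) :=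
    (List.perm_ext_iff_of_nodup (PySem.Set.nodup_ofList _) (PySem.Set.nodup_ofList _)).mpr hmemkeys
  have hKBlt : (PySem.Set.ofList (recs.map pyLangOf) : List String).Pairwise (· < ·) := by
    refine ofList_pairwise_lt _ ?_
    rw [List.pairwise_map]
    exact hrecpw
  -- name the group-building function
  set f : String → String × List (List (String × String)) :=
    fun k => (k, PySem.List.sorted (fr.filter (fun r => pyLangOf r == k)) pyPathOf) with hf
  have hAmap : ((PySem.Set.ofList (fr.map pyLangOf) : List String).map
        ((fun kv => (kv.1, PySem.List.sorted kv.2 pyPathOf)) ∘ (fun k => (k, fr.filter (fun r => pyLangOf r == k)))))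
      = (PySem.Set.ofList (fr.map pyLangOf) : List String).map f := by
    simp [hf, Function.comp]
  have hsorted : PySem.List.sorted ((PySem.Set.ofList (fr.map pyLangOf) : List String).map f) (fun kv => kv.1)
      = (PySem.Set.ofList (recs.map pyLangOf) : List String).map f := by
    refine PySem.List.sorted_eq_of_perm_of_pairwise_lt _ _ _ (hperm.map f) ?_
    rw [List.pairwise_map]
    exact hKBlt.imp (fun hab => by simpa [hf] using hab)
  rw [hAmap, hsorted, items_ofList_of_nodup]
  · -- B's groups are A's groups: stability of the tuple sort
    refine List.map_congr_left ?_
    intro k _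
    rw [hf, hrecs, filter_sorted2 fr pyLangOf pyPathOf k]
  · rw [List.map_map]
    have : (Prod.fst ∘ f) = id := by funext k; simp [hf]
    rw [this, List.map_id]
    exact PySem.Set.nodup_ofList _

-- ===== VERDICT (by name: the statement is the Claim_ definition above) =====
theorem group_by_language_spec : Claim_equal_group_by_language := by
  intro fr _ _
  unfold Spec_group_by_language
  exact group_by_language_eq fr
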